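-- pv_equiv track=rewrite | github.com/budvigszandi/musical-error-evaluation | evaluate_notes.py | get_sum_of_scenario
-- ===== SOURCE A (Python) =====
-- from collections import Counter
--
-- COVERED_NOTE_POINT = 1
--
-- DUPLICATE_COVER_POINT = 1
--
-- RELATIONSHIP_POINT_WEIGHT = 1
--
-- COVERED_NOTE_POINT_WEIGHT = 1
--
-- DUPLICATE_POINT_WEIGHT = 1
--
-- def get_sum_of_scenario(index_list, relationship_point_matrix):
--   sum = 0
--   for i in range(len(index_list)):
--     sum += relationship_point_matrix[i][index_list[i]]
--   sum *= RELATIONSHIP_POINT_WEIGHT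
--   covered_notes_count = get_covered_notes_count(index_list)
--   sum += covered_notes_count * COVERED_NOTE_POINT_WEIGHT
--   duplicate_covers_count = get_duplicated_count(index_list)
--   sum -= duplicate_covers_count * DUPLICATE_POINT_WEIGHT
--   return sum
--
-- def get_covered_notes_count(index_list):
--   return len(Counter(index_list).keys()) * COVERED_NOTE_POINT
--
-- def get_duplicated_count(index_list):
--   frequency_of_notes = Counter(index_list).values()
--   number_of_duplicates_list = [i - 1 for i in frequency_of_notes]
--   return sum(number_of_duplicates_list) * DUPLICATE_COVER_POINT
-- ===== SOURCE B (Python) =====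
-- COVERED_NOTE_POINT = 1
--
-- DUPLICATE_COVER_POINT = 1
--
-- RELATIONSHIP_POINT_WEIGHT = 1
--
-- COVERED_NOTE_POINT_WEIGHT = 1
--
-- DUPLICATE_POINT_WEIGHT = 1
--
-- def get_sum_of_scenario(index_list, relationship_point_matrix):
--   # Single online pass: score each assignment as it is read.  A first
--   # occurrence of an index covers a new note (+COVERED_NOTE_POINT), a repeat
--   # is a duplicate cover (-DUPLICATE_COVER_POINT); no counts are ever built.
--   seen = set()
--   total = 0
--   for row, j in zip(relationship_point_matrix, index_list):
--     total += row[j] * RELATIONSHIP_POINT_WEIGHT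
--     if j in seen:
--       total -= DUPLICATE_COVER_POINT * DUPLICATE_POINT_WEIGHT
--     else:
--       seen.add(j)
--       total += COVERED_NOTE_POINT * COVERED_NOTE_POINT_WEIGHT
--   return total
-- ===== Notes on version B (the rewrite author's own statement) =====
-- stated objective: alternative
-- what changed: B scores incrementally in one online pass with a seen-set (+1 for each first occurrence, -1 for each repeat, matrix entry added as it is read), eliminating A's staged structure of a position loop plus two separate Counter aggregations; correct because sum over Counter of (freq-1) equals the number of non-first occurrences.
import Mathlib
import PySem

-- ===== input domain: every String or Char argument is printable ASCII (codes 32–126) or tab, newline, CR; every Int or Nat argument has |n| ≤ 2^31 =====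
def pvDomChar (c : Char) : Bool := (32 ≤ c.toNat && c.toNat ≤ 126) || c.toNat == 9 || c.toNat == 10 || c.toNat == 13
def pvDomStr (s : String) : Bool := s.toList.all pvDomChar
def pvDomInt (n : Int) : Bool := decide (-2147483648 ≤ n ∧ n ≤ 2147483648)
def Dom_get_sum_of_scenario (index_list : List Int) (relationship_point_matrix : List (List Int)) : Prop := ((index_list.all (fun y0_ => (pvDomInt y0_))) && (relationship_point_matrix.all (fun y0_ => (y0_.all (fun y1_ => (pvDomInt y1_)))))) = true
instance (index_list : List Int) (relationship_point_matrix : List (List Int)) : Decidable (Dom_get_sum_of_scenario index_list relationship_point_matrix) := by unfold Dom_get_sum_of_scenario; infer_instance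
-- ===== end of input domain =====

-- B scores in one online pass with a seen-set (+1 per first occurrence, -1 per repeat),
-- replacing A's position loop plus two separate Counter aggregations (objective: alternative).

-- ===== PORT A =====
def COVERED_NOTE_POINT : Int := 1
def DUPLICATE_COVER_POINT : Int := 1
def RELATIONSHIP_POINT_WEIGHT : Int := 1
def COVERED_NOTE_POINT_WEIGHT : Int := 1
def DUPLICATE_POINT_WEIGHT : Int := 1

def get_covered_notes_count (index_list : List Int) : Int :=
  ((PySem.Dict.counter index_list).keys.length : Int) * COVERED_NOTE_POINT

def get_duplicated_count (index_list : List Int) : Int :=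
  ((PySem.Dict.counter index_list).values.map (fun i => i - 1)).sum * DUPLICATE_COVER_POINT

def get_sum_of_scenario (index_list : List Int) (relationship_point_matrix : List (List Int)) : Int :=
  -- for i in range(len(index_list)): sum += relationship_point_matrix[i][index_list[i]]
  -- (pyGetD defaults are never used inside Pre_)
  let s := (PySem.List.pyRange 0 (index_list.length : Int) 1).foldl
    (fun acc i => acc + PySem.List.pyGetD (PySem.List.pyGetD relationship_point_matrix i [])
                          (PySem.List.pyGetD index_list i 0) 0) 0
  let s := s * RELATIONSHIP_POINT_WEIGHT
  let covered_notes_count := get_covered_notes_count index_list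
  let s := s + covered_notes_count * COVERED_NOTE_POINT_WEIGHT
  let duplicate_covers_count := get_duplicated_count index_list
  s - duplicate_covers_count * DUPLICATE_POINT_WEIGHT

-- ===== PORT B =====
-- one online pass over zip(matrix, indices), state = (seen set, running total)
def get_sum_of_scenario_alt (index_list : List Int) (relationship_point_matrix : List (List Int)) : Int :=
  ((relationship_point_matrix.zip index_list).foldl
    (fun st p =>
      let t := st.2 + PySem.List.pyGetD p.1 p.2 0 * RELATIONSHIP_POINT_WEIGHT
      if PySem.Set.contains st.1 p.2 then
        (st.1, t - DUPLICATE_COVER_POINT * DUPLICATE_POINT_WEIGHT)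
      else
        (PySem.Set.add st.1 p.2, t + COVERED_NOTE_POINT * COVERED_NOTE_POINT_WEIGHT))
    ((PySem.Set.empty : PySem.Set Int), (0 : Int))).2

-- ===== PRECONDITION & SPEC =====
-- Pre_ excludes exactly the inputs where Python A raises IndexError: the matrix must have a
-- row for every position of index_list, and each index_list[i] must be a valid (possibly
-- negative, Python-style) index into its row.
def Pre_get_sum_of_scenario (index_list : List Int) (relationship_point_matrix : List (List Int)) : Prop :=
  index_list.length ≤ relationship_point_matrix.length ∧
  ∀ p ∈ relationship_point_matrix.zip index_list, PySem.Raise.InRange p.1.length p.2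
instance (index_list : List Int) (relationship_point_matrix : List (List Int)) : Decidable (Pre_get_sum_of_scenario index_list relationship_point_matrix) := by unfold Pre_get_sum_of_scenario; infer_instance

def pvWitness_get_sum_of_scenario : List Int × List (List Int) := ([0, -1, 0], [[3, 4], [5], [7]])

def Spec_get_sum_of_scenario (index_list : List Int) (relationship_point_matrix : List (List Int)) (out : Int) : Prop := out = get_sum_of_scenario_alt index_list relationship_point_matrix
instance (index_list : List Int) (relationship_point_matrix : List (List Int)) (out : Int) : Decidable (Spec_get_sum_of_scenario index_list relationship_point_matrix out) := by unfold Spec_get_sum_of_scenario; infer_instance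

-- ===== CLAIM (what is proved, stated in full; the proofs are below) =====
def Claim_equal_get_sum_of_scenario : Prop := ∀ (index_list : List Int) (relationship_point_matrix : List (List Int)), Dom_get_sum_of_scenario index_list relationship_point_matrix → Pre_get_sum_of_scenario index_list relationship_point_matrix → Spec_get_sum_of_scenario index_list relationship_point_matrix (get_sum_of_scenario index_list relationship_point_matrix)

-- ===== LEMMAS AND PROOFS =====

-- A's index loop, folded over pyRange, abstracted to a sum over Finset.range.
theorem loop_to_sum (n : Nat) (g : Int → Int) (acc : Int) :
    (PySem.List.pyRange 0 (n : Int) 1).foldl (fun a j => a + g j) acc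
      = acc + ∑ j ∈ Finset.range n, g (j : Int) := by
  induction n generalizing acc with
  | zero => simp [PySem.List.pyRange]
  | succ k ih =>
      rw [show ((k + 1 : Nat) : Int) = (k : Int) + 1 by push_cast; ring,
        PySem.List.pyRange_one_succ_right (by omega)]
      simp [List.foldl_append, ih, Finset.sum_range_succ]
      ring

-- the indexed sum over range(len il) equals the zip-map sum (no precondition needed:
-- both sides drop positions past the shorter list via the 0 default).
theorem sum_range_eq_zip_sum (index_list : List Int) (m : List (List Int)) :
    (∑ j ∈ Finset.range index_list.length,
        PySem.List.pyGetD (PySem.List.pyGetD m (j : Int) [])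
          (PySem.List.pyGetD index_list (j : Int) 0) 0)
      = ((m.zip index_list).map (fun p => PySem.List.pyGetD p.1 p.2 0)).sum := by
  induction index_list generalizing m with
  | nil => simp
  | cons x xs ih =>
      cases m with
      | nil =>
          simp [PySem.List.pyGetD, PySem.List.pyGet?, PySem.List.pyIdx?]
      | cons r rs =>
          simp only [List.length_cons]
          rw [Finset.sum_range_succ']
          simp only [PySem.List.pyGetD_natCast]
          simp only [List.zip_cons_cons, List.map_cons, List.sum_cons]
          rw [← ih rs]
          simp [PySem.List.pyGetD_natCast]
          ring

-- sum of counts over any nodup list with the same members as l is l.length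
theorem sum_count_over_set (l : List Int) :
    ((PySem.Set.ofList l).map (fun k => l.count k)).sum = l.length := by
  have hperm : List.Perm (PySem.Set.ofList l) l.dedup := by
    rw [List.perm_ext_iff_of_nodup (PySem.Set.nodup_ofList l) (List.nodup_dedup l)]
    intro a
    rw [PySem.Set.mem_ofList, List.mem_dedup]
  calc ((PySem.Set.ofList l).map (fun k => l.count k)).sum
      = ((l.dedup).map (fun k => l.count k)).sum := (hperm.map _).sum_eq
    _ = l.length := List.sum_map_count_dedup_eq_length l

theorem values_counter_sum (l : List Int) :
    ((PySem.Dict.counter l).values.map (fun i => i - 1)).sum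
      = (l.length : Int) - ((PySem.Set.ofList l).length : Int) := by
  have hv : (PySem.Dict.counter l).values
      = (PySem.Set.ofList l).map (fun k => (l.count k : Int)) := by
    have : (PySem.Dict.counter l).items
        = (PySem.Set.ofList l).map (fun k => (k, (l.count k : Int))) :=
      PySem.Dict.items_counter l
    calc (PySem.Dict.counter l).values
        = (PySem.Dict.counter l).items.map Prod.snd := rfl
      _ = ((PySem.Set.ofList l).map (fun k => (k, (l.count k : Int)))).map Prod.snd := by rw [this]
      _ = (PySem.Set.ofList l).map (fun k => (l.count k : Int)) := by simp
  rw [hv, List.map_map]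
  have : ∀ (s : List Int),
      (s.map ((fun i => i - 1) ∘ fun k => (l.count k : Int))).sum
        = ((s.map (fun k => l.count k)).sum : Int) - s.length := by
    intro s; induction s with
    | nil => simp
    | cons a t ih => simp [ih]; ring
  rw [this]
  have h2 : ((PySem.Set.ofList l).map (fun k => l.count k)).sum = l.length :=
    sum_count_over_set l
  push_cast [← h2]
  ring

-- invariant of B's online fold: total = start + zip-map sum + 2·(new distinct) − length
theorem alt_fold_inv (pairs : List (List Int × Int)) (s : PySem.Set Int) (t : Int) :
    (pairs.foldl
      (fun st p =>
        let t' := st.2 + PySem.List.pyGetD p.1 p.2 0 * RELATIONSHIP_POINT_WEIGHT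
        if PySem.Set.contains st.1 p.2 then
          (st.1, t' - DUPLICATE_COVER_POINT * DUPLICATE_POINT_WEIGHT)
        else
          (PySem.Set.add st.1 p.2, t' + COVERED_NOTE_POINT * COVERED_NOTE_POINT_WEIGHT))
      (s, t)).2
    = t + (pairs.map (fun p => PySem.List.pyGetD p.1 p.2 0)).sum
        + 2 * ((PySem.Set.update s (pairs.map Prod.snd)).length : Int)
        - 2 * (s.length : Int) - (pairs.length : Int) := by
  induction pairs generalizing s t with
  | nil => simp [PySem.Set.update]
  | cons p ps ih =>
      simp only [List.foldl_cons, List.map_cons, List.sum_cons, List.length_cons]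
      by_cases h : PySem.Set.contains s p.2
      · have hm : p.2 ∈ s := by simpa using h
        have hadd : PySem.Set.add s p.2 = s := by simp [PySem.Set.add, hm]
        have hupd : PySem.Set.update s (p.2 :: ps.map Prod.snd)
            = PySem.Set.update s (ps.map Prod.snd) := by
          simp [PySem.Set.update, hadd]
        simp only [h, if_pos]
        rw [ih, hupd]
        simp only [DUPLICATE_COVER_POINT, RELATIONSHIP_POINT_WEIGHT, DUPLICATE_POINT_WEIGHT]
        push_cast
        ring
      · have hm : p.2 ∉ s := by simpa using h
        have hadd : PySem.Set.add s p.2 = s ++ [p.2] := by simp [PySem.Set.add, hm]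
        have hupd : PySem.Set.update s (p.2 :: ps.map Prod.snd)
            = PySem.Set.update (s ++ [p.2]) (ps.map Prod.snd) := by
          simp [PySem.Set.update, hadd]
        simp only [h, if_neg, Bool.false_eq_true, not_false_iff]
        rw [ih, hupd, hadd]
        simp only [COVERED_NOTE_POINT, RELATIONSHIP_POINT_WEIGHT, COVERED_NOTE_POINT_WEIGHT,
          List.length_append, List.length_cons, List.length_nil]
        push_cast
        ring

-- ===== VERDICT (by name: the statement is the Claim_ definition above) =====
theorem get_sum_of_scenario_spec : Claim_equal_get_sum_of_scenario := by
  intro il m _ hpre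
  unfold Spec_get_sum_of_scenario get_sum_of_scenario get_sum_of_scenario_alt
    get_covered_notes_count get_duplicated_count
  have hsnd : (m.zip il).map Prod.snd = il :=
    List.map_snd_zip hpre.1
  have hlen : (m.zip il).length = il.length := by
    have h1 := hpre.1; rw [List.length_zip]; omega
  rw [alt_fold_inv, hsnd, hlen]
  simp only [loop_to_sum, sum_range_eq_zip_sum, values_counter_sum,
    PySem.Dict.keys_counter, COVERED_NOTE_POINT, DUPLICATE_COVER_POINT,
    RELATIONSHIP_POINT_WEIGHT, COVERED_NOTE_POINT_WEIGHT, DUPLICATE_POINT_WEIGHT,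
    PySem.Set.update, PySem.Set.empty]
  have : PySem.Set.ofList il = il.foldl PySem.Set.add [] := PySem.Set.ofList_eq_foldl il
  rw [← this]
  simp
  ring
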